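-- pv_equiv track=rewrite | github.com/muzavan/py-interviewbit | dynamic_programming/ways_to_color_a_3xn_board.py | solve
-- ===== SOURCE A (Python) =====
-- MOD = 10**9 + 7
--
-- def solve(A):
--     color2 = 12
--     color3 = 24
--
--     for _ in range(2, A+1):
--         tcolor3 = ((10*color2) + (11*color3)) % MOD
--         tcolor2 = ((7*color2) + (5*color3)) % MOD
--
--         color2, color3 = tcolor2, tcolor3
--
--     return (color2 + color3) % MOD
-- ===== SOURCE B (Python) =====
-- MOD = 10**9 + 7
--
-- def solve(A):
--     # faster: matrix binary exponentiation of the linear recurrence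
--     def mul(X, Y):
--         a, b, c, d = X
--         e, f, g, h = Y
--         return ((a*e + b*g) % MOD, (a*f + b*h) % MOD,
--                 (c*e + d*g) % MOD, (c*f + d*h) % MOD)
--
--     n = A - 1
--     M = (7, 5, 10, 11)
--     R = (1, 0, 0, 1)
--     while n > 0:
--         if n & 1:
--             R = mul(R, M)
--         M = mul(M, M)
--         n >>= 1
--     a, b, c, d = R
--     return (12*(a + c) + 24*(b + d)) % MOD
-- ===== Notes on version B (the rewrite author's own statement) =====
-- stated objective: faster
-- what changed: Replaces the linear iteration of the two-variable recurrence with square-matrix binary exponentiation.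
import Mathlib
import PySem

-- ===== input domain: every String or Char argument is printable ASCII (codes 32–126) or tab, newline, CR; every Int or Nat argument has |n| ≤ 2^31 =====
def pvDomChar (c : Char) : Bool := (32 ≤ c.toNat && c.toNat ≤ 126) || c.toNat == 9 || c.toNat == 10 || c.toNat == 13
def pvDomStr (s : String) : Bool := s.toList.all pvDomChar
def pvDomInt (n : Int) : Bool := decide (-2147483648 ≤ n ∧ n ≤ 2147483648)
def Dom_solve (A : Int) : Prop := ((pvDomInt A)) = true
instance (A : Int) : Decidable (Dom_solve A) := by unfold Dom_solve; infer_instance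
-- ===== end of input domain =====

-- B replaces A's O(A) iteration of the two-term linear recurrence by square-matrix
-- binary exponentiation (O(log A)); same value for every A.

-- ===== PORT A =====
def solve (A : Int) : Int :=
  let s := (PySem.List.pyRange 2 (A + 1) 1).foldl
    (fun (st : Int × Int) _ =>
      let tcolor3 := PySem.Int.mod (10 * st.1 + 11 * st.2) 1000000007
      let tcolor2 := PySem.Int.mod (7 * st.1 + 5 * st.2) 1000000007
      (tcolor2, tcolor3)) (12, 24)
  PySem.Int.mod (s.1 + s.2) 1000000007

-- ===== PORT B =====
def pvMul (X Y : Int × Int × Int × Int) : Int × Int × Int × Int :=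
  (PySem.Int.mod (X.1 * Y.1 + X.2.1 * Y.2.2.1) 1000000007,
   PySem.Int.mod (X.1 * Y.2.1 + X.2.1 * Y.2.2.2) 1000000007,
   PySem.Int.mod (X.2.2.1 * Y.1 + X.2.2.2 * Y.2.2.1) 1000000007,
   PySem.Int.mod (X.2.2.1 * Y.2.1 + X.2.2.2 * Y.2.2.2) 1000000007)

-- the while loop of Source B; for positive n, Python's bitwise parity test and right shift are exactly the mod-two test and floor-halving used here
def pvPowLoop (n : Int) (R M : Int × Int × Int × Int) : Int × Int × Int × Int :=
  if 0 < n then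
    pvPowLoop (PySem.Int.floordiv n 2)
      (if PySem.Int.mod n 2 = 1 then pvMul R M else R) (pvMul M M)
  else R
termination_by n.toNat
decreasing_by
  rename_i h
  rw [PySem.Int.floordiv_eq_ediv_of_pos (by omega)]
  omega

def solve_alt (A : Int) : Int :=
  let r := pvPowLoop (A - 1) (1, 0, 0, 1) (7, 5, 10, 11)
  PySem.Int.mod (12 * (r.1 + r.2.2.1) + 24 * (r.2.1 + r.2.2.2)) 1000000007

-- ===== PRECONDITION & SPEC =====
def Spec_solve (A : Int) (out : Int) : Prop := out = solve_alt A
instance (A : Int) (out : Int) : Decidable (Spec_solve A out) := by unfold Spec_solve; infer_instance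

-- ===== CLAIM (what is proved, stated in full; the proofs are below) =====
def Claim_equal_solve : Prop := ∀ (A : Int), Dom_solve A → Spec_solve A (solve A)

-- ===== LEMMAS AND PROOFS =====

abbrev pvK : Type := ZMod 1000000007

def pvCastM (t : Int × Int × Int × Int) : Matrix (Fin 2) (Fin 2) pvK :=
  !![(t.1 : pvK), (t.2.1 : pvK); (t.2.2.1 : pvK), (t.2.2.2 : pvK)]

def pvMz : Matrix (Fin 2) (Fin 2) pvK := !![(7 : pvK), 5; 10, 11]

theorem pv_intCast_emod (x : Int) :
    ((x % 1000000007 : Int) : pvK) = (x : pvK) := by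
  have h := ZMod.intCast_mod x 1000000007
  exact_mod_cast h

theorem pv_intCast_mod (x : Int) :
    ((PySem.Int.mod x 1000000007 : Int) : pvK) = (x : pvK) := by
  rw [PySem.Int.mod_eq_emod_of_pos (by norm_num)]
  exact pv_intCast_emod x

theorem pv_mod_congr (x y : Int) (h : (x : pvK) = (y : pvK)) :
    PySem.Int.mod x 1000000007 = PySem.Int.mod y 1000000007 := by
  rw [PySem.Int.mod_eq_emod_of_pos (by norm_num),
      PySem.Int.mod_eq_emod_of_pos (by norm_num)]
  have h' : (x : ZMod 1000000007) = (y : ZMod 1000000007) := h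
  rw [ZMod.intCast_eq_intCast_iff'] at h'
  exact_mod_cast h'

theorem pvCastM_mul (X Y : Int × Int × Int × Int) :
    pvCastM (pvMul X Y) = pvCastM X * pvCastM Y := by
  ext i j
  fin_cases i <;> fin_cases j <;>
    (simp [pvMul, pvCastM, Matrix.mul_apply, Fin.sum_univ_two, pv_intCast_emod];
     try (push_cast; ring))

theorem pvCastM_one : pvCastM (1, 0, 0, 1) = 1 := by
  ext i j
  fin_cases i <;> fin_cases j <;> simp [pvCastM]

theorem pvPowLoop_cast (n : Int) (R M : Int × Int × Int × Int) :
    pvCastM (pvPowLoop n R M) = pvCastM R * (pvCastM M) ^ n.toNat := by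
  fun_induction pvPowLoop n R M with
  | case1 n R M hpos ih =>
      have hfd : PySem.Int.floordiv n 2 = n / 2 :=
        PySem.Int.floordiv_eq_ediv_of_pos (by norm_num)
      have hmd : PySem.Int.mod n 2 = n % 2 :=
        PySem.Int.mod_eq_emod_of_pos (by norm_num)
      simp only [dite_eq_ite] at ih
      rw [ih, pvCastM_mul]
      set k := (PySem.Int.floordiv n 2).toNat with hk
      have hk' : k = (n / 2).toNat := by rw [hk, hfd]
      by_cases h2 : PySem.Int.mod n 2 = 1
      · have h2' : n % 2 = 1 := by rw [← hmd]; exact h2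
        rw [if_pos h2, pvCastM_mul]
        have hn : n.toNat = 2 * k + 1 := by omega
        rw [hn, ← sq, ← pow_mul, pow_succ', pow_mul, sq, mul_assoc]
      · have h2' : n % 2 ≠ 1 := by rw [← hmd]; exact h2
        rw [if_neg h2]
        have hn : n.toNat = 2 * k := by omega
        rw [hn, ← sq, ← pow_mul]
  | case2 n R M hpos =>
      have : n.toNat = 0 := by omega
      simp [this]

def pvStepZ (st : pvK × pvK) : pvK × pvK :=
  (7 * st.1 + 5 * st.2, 10 * st.1 + 11 * st.2)

theorem pv_foldl_cast (l : List Int) (c2 c3 : Int) :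
    (((l.foldl (fun (st : Int × Int) _ =>
        ((PySem.Int.mod (7 * st.1 + 5 * st.2) 1000000007 : Int),
         (PySem.Int.mod (10 * st.1 + 11 * st.2) 1000000007 : Int))) (c2, c3)).1 : pvK),
     ((l.foldl (fun (st : Int × Int) _ =>
        ((PySem.Int.mod (7 * st.1 + 5 * st.2) 1000000007 : Int),
         (PySem.Int.mod (10 * st.1 + 11 * st.2) 1000000007 : Int))) (c2, c3)).2 : pvK)) =
    l.foldl (fun st _ => pvStepZ st) ((c2 : pvK), (c3 : pvK)) := by
  induction l generalizing c2 c3 with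
  | nil => rfl
  | cons a l ih =>
      simp only [List.foldl_cons]
      rw [ih]
      simp only [pvStepZ]
      rw [pv_intCast_mod, pv_intCast_mod]
      congr 1
      simp only [Prod.mk.injEq]
      refine ⟨by push_cast; ring, by push_cast; ring⟩

theorem pv_foldl_mat (l : List Int) (x y : pvK) :
    l.foldl (fun st _ => pvStepZ st) (x, y) =
      ((pvMz ^ l.length) 0 0 * x + (pvMz ^ l.length) 0 1 * y,
       (pvMz ^ l.length) 1 0 * x + (pvMz ^ l.length) 1 1 * y) := by
  induction l generalizing x y with
  | nil => simp
  | cons a l ih =>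
      simp only [List.foldl_cons, List.length_cons]
      rw [ih]
      have hp : pvMz ^ (l.length + 1) = pvMz ^ l.length * pvMz := pow_succ _ _
      rw [hp]
      simp [pvStepZ, pvMz, Matrix.mul_apply, Fin.sum_univ_two]
      constructor <;> ring

theorem pvCastM_M0 : pvCastM (7, 5, 10, 11) = pvMz := by rfl

-- ===== VERDICT (by name: the statement is the Claim_ definition above) =====
theorem solve_spec : Claim_equal_solve := by
  intro A _
  unfold Spec_solve solve solve_alt
  simp only
  apply pv_mod_congr
  set l := PySem.List.pyRange 2 (A + 1) 1 with hl
  have hlen : l.length = (A - 1).toNat := by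
    rw [hl, PySem.List.length_pyRange_one]; omega
  have hA := pv_foldl_cast l 12 24
  rw [pv_foldl_mat, hlen] at hA
  have hB := pvPowLoop_cast (A - 1) (1, 0, 0, 1) (7, 5, 10, 11)
  rw [pvCastM_one, pvCastM_M0, one_mul] at hB
  set r := pvPowLoop (A - 1) (1, 0, 0, 1) (7, 5, 10, 11) with hr
  have e00 : (r.1 : pvK) = (pvMz ^ (A - 1).toNat) 0 0 := by
    have h := congrFun (congrFun hB 0) 0; simpa [pvCastM] using h
  have e01 : (r.2.1 : pvK) = (pvMz ^ (A - 1).toNat) 0 1 := by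
    have h := congrFun (congrFun hB 0) 1; simpa [pvCastM] using h
  have e10 : (r.2.2.1 : pvK) = (pvMz ^ (A - 1).toNat) 1 0 := by
    have h := congrFun (congrFun hB 1) 0; simpa [pvCastM] using h
  have e11 : (r.2.2.2 : pvK) = (pvMz ^ (A - 1).toNat) 1 1 := by
    have h := congrFun (congrFun hB 1) 1; simpa [pvCastM] using h
  have hA1 := congrArg Prod.fst hA
  have hA2 := congrArg Prod.snd hA
  simp only at hA1 hA2
  push_cast
  rw [hA1, hA2, e00, e01, e10, e11]
  ring
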